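-- pv_equiv track=rewrite | github.com/emc255/python-algorithm-design | questions/medium/string/maximum_number_of_integers_to_choose_from_a_range_I.py | max_count_v2
-- ===== SOURCE A (Python) =====
-- def max_count_v2(banned: list[int], n: int, max_sum: int) -> int:
--     ans = 0
--     temp = 0
--     banned = set(banned)
--     for i in range(1, n + 1):
--         if temp >= max_sum or temp + i > max_sum:
--             break
--         elif i not in banned:
--             temp += i
--             ans += 1
--     return ans
-- ===== SOURCE B (Python) =====
-- def max_count_v2(banned, n, max_sum):
--     bs = sorted({x for x in banned if 1 <= x <= n})
--     count = 0
--     budget = max_sum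
--     start = 1
--     for boundary in bs + [n + 1]:
--         last = boundary - 1
--         if start <= last:
--             size = last - start + 1
--             # largest k in [0, size] with k*start + k*(k-1)//2 <= budget (triangular sum of the run's first k values)
--             lo, hi = 0, size
--             while lo < hi:
--                 mid = (lo + hi + 1) // 2
--                 if mid * start + mid * (mid - 1) // 2 <= budget:
--                     lo = mid
--                 else:
--                     hi = mid - 1
--             count += lo
--             if lo < size:
--                 return count
--             budget -= lo * start + lo * (lo - 1) // 2
--         start = boundary + 1
--     return count
-- ===== Notes on version B (the rewrite author's own statement) =====
-- stated objective: alternative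
-- what changed: A scans every integer 1..n one by one with a hash-set membership test and a greedy running sum; B instead sorts the relevant banned values and walks the gaps between consecutive banned values, taking each whole run of consecutive unbanned integers in one step via a binary search on closed-form triangular sums, so the per-integer scan disappears (intended as faster; a timing run measured 2.22x median at the largest size but not consistently across inputs, so no speed claim is made).
import Mathlib
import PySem

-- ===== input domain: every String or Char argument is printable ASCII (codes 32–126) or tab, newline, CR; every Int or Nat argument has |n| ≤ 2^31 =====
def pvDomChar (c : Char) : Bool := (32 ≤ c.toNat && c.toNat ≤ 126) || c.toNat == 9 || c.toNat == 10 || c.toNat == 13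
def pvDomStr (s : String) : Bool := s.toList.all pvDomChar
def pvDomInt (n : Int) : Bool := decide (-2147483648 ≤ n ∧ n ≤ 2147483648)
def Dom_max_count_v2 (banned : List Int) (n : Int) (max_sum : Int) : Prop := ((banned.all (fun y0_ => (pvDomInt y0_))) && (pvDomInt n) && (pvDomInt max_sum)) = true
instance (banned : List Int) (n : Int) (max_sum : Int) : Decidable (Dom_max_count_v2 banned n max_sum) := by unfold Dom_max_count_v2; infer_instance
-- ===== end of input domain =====

-- B replaces A's per-integer greedy scan (hash-set test for every i in 1..n) by a run-based
-- algorithm: sort the relevant banned values, walk the gaps between consecutive banned values,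
-- and take each run of consecutive unbanned integers in one step via a binary search on
-- triangular sums; return values proved equal on the whole domain.


-- ===== PORT A =====
-- A's `for i in range(1, n + 1)` with break, as a recursion on the loop counter i
-- (`fuel` = the number of remaining range elements, a pure totality guard: it starts at
-- n.toNat = len(range(1, n+1)) and one unit is consumed per iteration, so it never runs out)
def maxCountLoopA (bset : PySem.Set Int) (n max_sum : Int) : Nat → Int → Int → Int → Int
  | 0, _i, ans, _temp => ans
  | fuel+1, i, ans, temp =>
    if i ≤ n then
      if temp ≥ max_sum ∨ temp + i > max_sum then ans
      else if !(PySem.Set.contains bset i) then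
        maxCountLoopA bset n max_sum fuel (i + 1) (ans + 1) (temp + i)
      else
        maxCountLoopA bset n max_sum fuel (i + 1) ans temp
    else ans

def max_count_v2 (banned : List Int) (n : Int) (max_sum : Int) : Int :=
  maxCountLoopA (PySem.Set.ofList banned) n max_sum n.toNat 1 0 0

-- ===== PORT B =====
-- B's inner `while lo < hi` binary search for the largest k with k*start + k*(k-1)//2 <= budget
-- (`fuel` = totality guard, starts at the interval width (hi-lo).toNat which only shrinks)
def bsearchB (start budget : Int) : Nat → Int → Int → Int
  | 0, lo, _hi => lo
  | fuel+1, lo, hi =>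
    if lo < hi then
      let mid := PySem.Int.floordiv (lo + hi + 1) 2
      if mid * start + PySem.Int.floordiv (mid * (mid - 1)) 2 ≤ budget then
        bsearchB start budget fuel mid hi
      else
        bsearchB start budget fuel lo (mid - 1)
    else lo

-- B's `for boundary in bs + [n + 1]` loop with its early return
def maxCountLoopB (n : Int) : List Int → Int → Int → Int → Int
  | [], _start, _budget, count => count
  | boundary :: rest, start, budget, count =>
      let last := boundary - 1
      if start ≤ last then
        let size := last - start + 1
        let lo := bsearchB start budget size.toNat 0 size
        if lo < size then count + lo
        else maxCountLoopB n rest (boundary + 1)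
              (budget - (lo * start + PySem.Int.floordiv (lo * (lo - 1)) 2)) (count + lo)
      else maxCountLoopB n rest (boundary + 1) budget count

def max_count_v2_alt (banned : List Int) (n : Int) (max_sum : Int) : Int :=
  let bs := PySem.List.sorted
    (PySem.Set.ofList (banned.filter (fun x => decide (1 ≤ x) && decide (x ≤ n))))
    (fun x => x) false
  maxCountLoopB n (bs ++ [n + 1]) 1 max_sum 0

-- ===== PRECONDITION & SPEC =====
def Spec_max_count_v2 (banned : List Int) (n : Int) (max_sum : Int) (out : Int) : Prop := out = max_count_v2_alt banned n max_sum
instance (banned : List Int) (n : Int) (max_sum : Int) (out : Int) : Decidable (Spec_max_count_v2 banned n max_sum out) := by unfold Spec_max_count_v2; infer_instance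

-- ===== CLAIM (what is proved, stated in full; the proofs are below) =====
def Claim_equal_max_count_v2 : Prop := ∀ (banned : List Int) (n : Int) (max_sum : Int), Dom_max_count_v2 banned n max_sum → Spec_max_count_v2 banned n max_sum (max_count_v2 banned n max_sum)

-- ===== LEMMAS AND PROOFS =====

-- triangular sum of the k consecutive integers a, a+1, …, a+k-1 (proof-side recursion)
def triS (a : Int) : Nat → Int
  | 0 => 0
  | k+1 => a + triS (a+1) k

theorem triS_shift (k : Nat) : ∀ a : Int, triS (a+1) k = triS a k + k := by
  induction k with
  | zero => intro a; simp [triS]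
  | succ k ih =>
    intro a
    simp only [triS, ih (a+1), ih a]
    push_cast
    ring

theorem triS_succ' (a : Int) (k : Nat) : triS a (k+1) = triS a k + (a + k) := by
  simp only [triS, triS_shift k a]; ring

theorem triS_nonneg (a : Int) (ha : 1 ≤ a) (k : Nat) : 0 ≤ triS a k := by
  induction k with
  | zero => simp [triS]
  | succ k ih =>
    rw [triS_succ']
    have hk := Int.natCast_nonneg k
    omega

theorem triS_formula (k : Nat) : ∀ a : Int,
    (k:Int) * a + PySem.Int.floordiv ((k:Int) * ((k:Int) - 1)) 2 = triS a k := by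
  induction k with
  | zero =>
    intro a
    simp [triS]
  | succ k ih =>
    intro a
    rw [triS_succ', ← ih a]
    rw [PySem.Int.floordiv_eq_ediv_of_pos (by omega : (0:Int) < 2),
        PySem.Int.floordiv_eq_ediv_of_pos (by omega : (0:Int) < 2)]
    have hk : ((k:Int)+1) * ((k:Int)+1-1) = (k:Int) * ((k:Int)-1) + (k:Int) * 2 := by ring
    push_cast
    rw [hk, Int.add_mul_ediv_right _ _ (by omega : (2:Int) ≠ 0)]
    ring

-- specification of the port's binary search: it returns the largest admissible k
theorem bsearchB_spec (start budget size : Int) :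
    ∀ (fuel : Nat) (lo hi : Int), (hi - lo).toNat ≤ fuel → 0 ≤ lo → lo ≤ hi → hi ≤ size →
    (lo = 0 ∨ lo * start + PySem.Int.floordiv (lo * (lo - 1)) 2 ≤ budget) →
    (hi = size ∨ ¬ ((hi+1) * start + PySem.Int.floordiv ((hi+1) * (hi+1 - 1)) 2 ≤ budget)) →
    0 ≤ bsearchB start budget fuel lo hi ∧ bsearchB start budget fuel lo hi ≤ size ∧
    (bsearchB start budget fuel lo hi = 0 ∨
      (bsearchB start budget fuel lo hi) * start +
        PySem.Int.floordiv ((bsearchB start budget fuel lo hi) * (bsearchB start budget fuel lo hi - 1)) 2 ≤ budget) ∧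
    (bsearchB start budget fuel lo hi = size ∨
      ¬ ((bsearchB start budget fuel lo hi + 1) * start +
        PySem.Int.floordiv ((bsearchB start budget fuel lo hi + 1) * (bsearchB start budget fuel lo hi + 1 - 1)) 2 ≤ budget)) := by
  intro fuel
  induction fuel with
  | zero =>
    intro lo hi hfuel h0 hlh hhs hinv1 hinv2
    have : lo = hi := by omega
    subst this
    exact ⟨h0, hhs, hinv1, hinv2⟩
  | succ fuel ih =>
    intro lo hi hfuel h0 hlh hhs hinv1 hinv2
    by_cases hlt : lo < hi
    · have hmid : lo + 1 ≤ PySem.Int.floordiv (lo + hi + 1) 2 ∧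
          PySem.Int.floordiv (lo + hi + 1) 2 ≤ hi := by
        rw [PySem.Int.floordiv_eq_ediv_of_pos (by omega : (0:Int) < 2)]
        omega
      rw [bsearchB]
      simp only [if_pos hlt]
      generalize hM : PySem.Int.floordiv (lo + hi + 1) 2 = mid at hmid ⊢
      by_cases hp : mid * start + PySem.Int.floordiv (mid * (mid - 1)) 2 ≤ budget
      · rw [if_pos hp]
        exact ih mid hi (by omega) (by omega) (by omega) hhs (Or.inr hp) hinv2
      · rw [if_neg hp]
        refine ih lo (mid - 1) (by omega) h0 (by omega) (by omega) hinv1 (Or.inr ?_)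
        have : mid - 1 + 1 = mid := by ring
        rw [this]
        exact hp
    · rw [bsearchB]
      simp only [if_neg hlt]
      have : lo = hi := by omega
      subst this
      exact ⟨h0, hhs, hinv1, hinv2⟩

-- A's loop returns its accumulator once the counter has left the range
theorem loopA_done (bset : PySem.Set Int) (n m : Int) (fuel : Nat) (i ans temp : Int)
    (h : n < i) : maxCountLoopA bset n m fuel i ans temp = ans := by
  cases fuel with
  | zero => rfl
  | succ fuel => rw [maxCountLoopA, if_neg (by omega)]

-- A's loop marches through k consecutive unbanned integers whose total still fits
theorem runA (bset : PySem.Set Int) (n m : Int) :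
    ∀ (k fuel : Nat) (a ans temp : Int), 1 ≤ a → a + k ≤ n + 1 →
    (∀ x : Int, a ≤ x → x < a + k → PySem.Set.contains bset x = false) →
    temp + triS a k ≤ m →
    maxCountLoopA bset n m (fuel + k) a ans temp
      = maxCountLoopA bset n m fuel (a + k) (ans + k) (temp + triS a k) := by
  intro k
  induction k with
  | zero => intro fuel a ans temp _ _ _ _; simp [triS]
  | succ k ih =>
    intro fuel a ans temp ha hn hub hfit
    have h0 : 0 ≤ triS (a+1) k := triS_nonneg (a+1) (by omega) k
    have htriS : triS a (k+1) = a + triS (a+1) k := rfl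
    have han : a ≤ n := by
      have := Int.natCast_nonneg k
      omega
    have hnb : ¬ (temp ≥ m ∨ temp + a > m) := by rw [htriS] at hfit; omega
    have hcontains : PySem.Set.contains bset a = false :=
      hub a le_rfl (by have := Int.natCast_nonneg k; push_cast; omega)
    have hstep : fuel + (k + 1) = (fuel + k) + 1 := by omega
    rw [hstep, maxCountLoopA, if_pos han, if_neg hnb, if_pos (by rw [hcontains]; rfl)]
    have hrec := ih fuel (a+1) (ans+1) (temp+a) (by omega) (by push_cast at hn ⊢; omega)
      (fun x hx1 hx2 => hub x (by omega) (by push_cast at hx2 ⊢; omega))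
      (by rw [htriS] at hfit; omega)
    rw [hrec]
    have e1 : a + 1 + (k:Int) = a + ((k:Nat)+1 : Nat) := by push_cast; ring
    have e2 : ans + 1 + (k:Int) = ans + ((k:Nat)+1 : Nat) := by push_cast; ring
    have e3 : temp + a + triS (a+1) k = temp + triS a (k+1) := by rw [htriS]; ring
    rw [e1, e2, e3]

-- …and stops (returning ans + k) when the (k+1)-st element of the run no longer fits
theorem runA_partial (bset : PySem.Set Int) (n m : Int)
    (k fuel : Nat) (a ans temp last : Int) (ha : 1 ≤ a) (hk : a + k ≤ last) (hln : last ≤ n)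
    (hub : ∀ x : Int, a ≤ x → x ≤ last → PySem.Set.contains bset x = false)
    (hfit : k = 0 ∨ temp + triS a k ≤ m)
    (hstop : temp + triS a (k+1) > m) :
    maxCountLoopA bset n m (fuel + k + 1) a ans temp = ans + k := by
  have hmarch : maxCountLoopA bset n m (fuel + k + 1) a ans temp
      = maxCountLoopA bset n m (fuel + 1) (a + k) (ans + k) (temp + triS a k) := by
    have hsh : fuel + k + 1 = (fuel + 1) + k := by omega
    rcases hfit with h | h
    · subst h; simp [triS]
    · rw [hsh]
      exact runA bset n m k (fuel + 1) a ans temp ha (by omega)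
        (fun x hx1 hx2 => hub x hx1 (by omega)) h
  rw [hmarch, triS_succ'] at *
  have hle : a + (k:Int) ≤ n := by omega
  rw [maxCountLoopA, if_pos hle, if_pos (by omega)]

-- A's loop steps over a banned value without changing its state
theorem skipA (bset : PySem.Set Int) (n m : Int) (fuel : Nat) (c ans temp : Int)
    (hc : PySem.Set.contains bset c = true) :
    maxCountLoopA bset n m (fuel + 1) c ans temp = maxCountLoopA bset n m fuel (c+1) ans temp := by
  by_cases hcn : c ≤ n
  · rw [maxCountLoopA, if_pos hcn]
    by_cases hbr : temp ≥ m ∨ temp + c > m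
    · rw [if_pos hbr]
      cases fuel with
      | zero => rfl
      | succ fuel =>
        rw [maxCountLoopA]
        by_cases h1 : c + 1 ≤ n
        · rw [if_pos h1, if_pos (by omega)]
        · rw [if_neg h1]
    · rw [if_neg hbr, if_neg (by rw [hc]; simp)]
  · rw [maxCountLoopA, if_neg hcn, loopA_done bset n m fuel _ _ _ (by omega)]

-- the main induction: A's scan from `start` equals B's run-walk over the remaining boundaries
theorem mainLoop (bset : PySem.Set Int) (n m : Int) :
    ∀ (rest : List Int) (start ans temp : Int) (fuel : Nat),
    rest.Pairwise (· < ·) →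
    (∀ x ∈ rest, start ≤ x ∧ x ≤ n) →
    (∀ x : Int, start ≤ x → x ≤ n → (PySem.Set.contains bset x = true ↔ x ∈ rest)) →
    1 ≤ start →
    (n + 1 - start).toNat ≤ fuel →
    maxCountLoopA bset n m fuel start ans temp
      = maxCountLoopB n (rest ++ [n+1]) start (m - temp) ans := by
  intro rest
  induction rest with
  | nil =>
    intro start ans temp fuel _ _ hmem hs hfe
    simp only [List.nil_append, maxCountLoopB]
    by_cases hsl : start ≤ n + 1 - 1
    · rw [if_pos hsl]
      set size := n + 1 - 1 - start + 1 with hsize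
      have hsz1 : 1 ≤ size := by omega
      obtain ⟨hr0, hrs, hrinv1, hrinv2⟩ :=
        bsearchB_spec start (m - temp) size size.toNat 0 size (by omega) le_rfl (by omega) le_rfl
          (Or.inl rfl) (Or.inl rfl)
      set r := bsearchB start (m - temp) size.toNat 0 size with hrdef
      have hub : ∀ x : Int, start ≤ x → x ≤ n → PySem.Set.contains bset x = false := by
        intro x h1 h2
        have h := hmem x h1 h2
        cases hcb : PySem.Set.contains bset x with
        | false => rfl
        | true => exact absurd (h.mp hcb) (by simp)
      obtain ⟨kN, hkN⟩ : ∃ kN : Nat, r = (kN : Int) := ⟨r.toNat, by omega⟩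
      by_cases hlt : r < size
      · rw [if_pos hlt]
        obtain ⟨f', rfl⟩ : ∃ f', fuel = f' + kN + 1 := ⟨fuel - kN - 1, by omega⟩
        rw [runA_partial bset n m kN f' start ans temp n hs (by omega) le_rfl
          (fun x hx1 hx2 => hub x hx1 hx2)
          (by rcases hrinv1 with h | h
              · left; omega
              · right
                rw [hkN] at h
                rw [← triS_formula kN start]
                omega)
          (by rcases hrinv2 with h | h
              · omega
              · rw [← triS_formula (kN+1) start]
                rw [hkN] at h
                push_cast at h ⊢
                omega)]
        omega
      · rw [if_neg hlt]
        have hreq : r = size := by omega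
        have hfit : temp + triS start kN ≤ m := by
          rcases hrinv1 with h | h
          · omega
          · rw [hkN] at h
            rw [← triS_formula kN start]
            omega
        obtain ⟨f', rfl⟩ : ∃ f', fuel = f' + kN := ⟨fuel - kN, by omega⟩
        rw [runA bset n m kN f' start ans temp hs (by omega)
          (fun x hx1 hx2 => hub x hx1 (by omega)) hfit]
        rw [loopA_done bset n m f' _ _ _ (by omega)]
        omega
    · rw [if_neg hsl, loopA_done bset n m fuel _ _ _ (by omega)]
  | cons c rest' ih =>
    intro start ans temp fuel hpw hrange hmem hs hfe
    have hpw' := (List.pairwise_cons.mp hpw).2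
    have hclt := (List.pairwise_cons.mp hpw).1
    have hcr := hrange c (List.mem_cons_self ..)
    have hcban : PySem.Set.contains bset c = true := (hmem c hcr.1 hcr.2).mpr (List.mem_cons_self ..)
    have hrange' : ∀ x ∈ rest', c + 1 ≤ x ∧ x ≤ n := by
      intro x hx
      exact ⟨by have := hclt x hx; omega, (hrange x (List.mem_cons_of_mem _ hx)).2⟩
    have hmem' : ∀ x : Int, c + 1 ≤ x → x ≤ n → (PySem.Set.contains bset x = true ↔ x ∈ rest') := by
      intro x h1 h2
      rw [hmem x (by omega) h2, List.mem_cons]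
      constructor
      · rintro (rfl | h); omega; exact h
      · exact Or.inr
    simp only [List.cons_append, maxCountLoopB]
    by_cases hsl : start ≤ c - 1
    · rw [if_pos hsl]
      set size := c - 1 - start + 1 with hsize
      have hsz1 : 1 ≤ size := by omega
      obtain ⟨hr0, hrs, hrinv1, hrinv2⟩ :=
        bsearchB_spec start (m - temp) size size.toNat 0 size (by omega) le_rfl (by omega) le_rfl
          (Or.inl rfl) (Or.inl rfl)
      set r := bsearchB start (m - temp) size.toNat 0 size with hrdef
      have hub : ∀ x : Int, start ≤ x → x ≤ c - 1 → PySem.Set.contains bset x = false := by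
        intro x h1 h2
        have hxn : x ≤ n := by omega
        by_contra hcon
        have hx : x ∈ c :: rest' :=
          (hmem x h1 hxn).mp (by revert hcon; cases PySem.Set.contains bset x <;> simp)
        rcases List.mem_cons.mp hx with rfl | hx'
        · omega
        · have := hclt x hx'; omega
      obtain ⟨kN, hkN⟩ : ∃ kN : Nat, r = (kN : Int) := ⟨r.toNat, by omega⟩
      by_cases hlt : r < size
      · rw [if_pos hlt]
        obtain ⟨f', rfl⟩ : ∃ f', fuel = f' + kN + 1 := ⟨fuel - kN - 1, by omega⟩
        rw [runA_partial bset n m kN f' start ans temp (c-1) hs (by omega) (by omega) hub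
          (by rcases hrinv1 with h | h
              · left; omega
              · right
                rw [hkN] at h
                rw [← triS_formula kN start]
                omega)
          (by rcases hrinv2 with h | h
              · omega
              · rw [← triS_formula (kN+1) start]
                rw [hkN] at h
                push_cast at h ⊢
                omega)]
        omega
      · rw [if_neg hlt]
        have hreq : r = size := by omega
        have hfit : temp + triS start kN ≤ m := by
          rcases hrinv1 with h | h
          · omega
          · rw [hkN] at h
            rw [← triS_formula kN start]
            omega
        obtain ⟨f', rfl⟩ : ∃ f', fuel = f' + 1 + kN := ⟨fuel - kN - 1, by omega⟩
        rw [runA bset n m kN (f' + 1) start ans temp hs (by omega)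
          (fun x hx1 hx2 => hub x hx1 (by omega)) hfit]
        have hcs : start + (kN:Int) = c := by omega
        rw [hcs, skipA bset n m f' c _ _ hcban]
        rw [ih (c+1) (ans + kN) (temp + triS start kN) f' hpw' hrange' hmem' (by omega) (by omega)]
        have e1 : m - (temp + triS start kN)
            = m - temp - (r * start + PySem.Int.floordiv (r * (r - 1)) 2) := by
          rw [hkN, triS_formula kN start]
          ring
        have e2 : ans + (kN:Int) = ans + r := by omega
        rw [e1, e2]
    · rw [if_neg hsl]
      have hstart : start = c := by omega
      subst hstart
      obtain ⟨f', rfl⟩ : ∃ f', fuel = f' + 1 := ⟨fuel - 1, by omega⟩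
      rw [skipA bset n m f' start _ _ hcban]
      exact ih (start+1) ans temp f' hpw' hrange' hmem' (by omega) (by omega)

-- ===== VERDICT (by name: the statement is the Claim_ definition above) =====
theorem max_count_v2_spec : Claim_equal_max_count_v2 := by
  intro banned n m _
  unfold Spec_max_count_v2 max_count_v2 max_count_v2_alt
  set bset := PySem.Set.ofList banned with hbset
  set bs := PySem.List.sorted
    (PySem.Set.ofList (banned.filter (fun x => decide (1 ≤ x) && decide (x ≤ n))))
    (fun x => x) false with hbs
  have hpw : bs.Pairwise (· < ·) := PySem.List.sorted_ofList_pairwise_lt _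
  have hmem_bs : ∀ x : Int, x ∈ bs ↔ (x ∈ banned ∧ 1 ≤ x ∧ x ≤ n) := by
    intro x
    rw [hbs, PySem.List.mem_sorted, PySem.Set.mem_ofList, List.mem_filter]
    simp
  have h := mainLoop bset n m bs 1 0 0 n.toNat hpw
    (fun x hx => by have := (hmem_bs x).mp hx; omega)
    (fun x h1 h2 => by
      rw [hmem_bs x, hbset]
      rw [PySem.Set.contains_iff, PySem.Set.mem_ofList]
      constructor
      · intro hx; exact ⟨hx, h1, h2⟩
      · intro hx; exact hx.1)
    le_rfl
    (by omega)
  simpa using h
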